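-- pv_equiv track=rewrite | github.com/DroneLegion/BlenderDroneShow | drone-show-src/operators/check.py | compress_warnings_frames
-- ===== SOURCE A (Python) =====
-- import itertools
-- from typing import Any, Iterable, Iterator
--
-- def compress_warnings_frames(
--     warnings: Iterable[tuple[int, Any]]
-- ) -> Iterator[tuple[tuple[int, int], list[Any]]]:
--     for key, group in itertools.groupby(
--         enumerate(warnings),
--         lambda x: x[0] - x[1][0],
--     ):
--         group = [warning for _, warning in group]
--         values = [warning[1] for warning in group]
--         yield (group[0][0], group[-1][0]), values
-- ===== SOURCE B (Python) =====
-- def compress_warnings_frames(warnings):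
--     # Walks the warnings in reverse, building the runs back-to-front by either
--     # extending the most recently discovered run or opening a new one; a final
--     # reversal pass restores the forward order.
--     acc = []  # runs discovered back-to-front; each run's values stored reversed
--     for frame, value in reversed(list(warnings)):
--         if acc and acc[-1][0][0] == frame + 1:
--             (_, end), vals = acc[-1]
--             vals.append(value)
--             acc[-1] = ((frame, end), vals)
--         else:
--             acc.append(((frame, frame), [value]))
--     for bounds, vals in reversed(acc):
--         yield bounds, vals[::-1]
-- ===== Notes on version B (the rewrite author's own statement) =====
-- stated objective: alternative
-- what changed: Replaces the forward enumerate+itertools.groupby index-minus-frame key trick with a backward traversal that builds the output back-to-front, merging each element into the most recently opened run or opening a new one, followed by a reversal pass.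
import Mathlib
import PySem

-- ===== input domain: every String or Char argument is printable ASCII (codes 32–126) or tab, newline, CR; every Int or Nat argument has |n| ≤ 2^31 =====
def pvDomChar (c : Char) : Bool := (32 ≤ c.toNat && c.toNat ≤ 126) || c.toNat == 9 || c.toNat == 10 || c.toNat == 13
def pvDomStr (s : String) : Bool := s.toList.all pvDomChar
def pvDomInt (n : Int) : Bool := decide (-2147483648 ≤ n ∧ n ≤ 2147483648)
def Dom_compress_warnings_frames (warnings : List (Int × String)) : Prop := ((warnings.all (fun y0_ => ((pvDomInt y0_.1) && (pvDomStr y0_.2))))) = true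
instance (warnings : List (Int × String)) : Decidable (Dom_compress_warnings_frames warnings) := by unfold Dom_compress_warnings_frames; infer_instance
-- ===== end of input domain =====

-- B replaces A's forward enumerate+groupby key trick with a backward traversal
-- that builds the runs back-to-front and then reverses them; same cost.

-- ===== PORT A =====
-- key of an enumerated element: x[0] - x[1][0]
def keyOf (p : Int × (Int × String)) : Int := p.1 - p.2.1

-- enumerate(warnings) starting at index n
def enumFrom (n : Int) : List (Int × String) → List (Int × (Int × String))
  | [] => []
  | w :: ws => (n, w) :: enumFrom (n + 1) ws

-- itertools.groupby: maximal runs of consecutive elements with equal key (left to right)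
def groupByKey : List (Int × (Int × String)) → List (List (Int × (Int × String)))
  | [] => []
  | x :: xs =>
    (x :: xs.takeWhile (fun y => keyOf y == keyOf x)) ::
      groupByKey (xs.dropWhile (fun y => keyOf y == keyOf x))
  termination_by l => l.length
  decreasing_by
    simp only [List.length_cons]
    exact Nat.lt_succ_of_le (List.length_dropWhile_le _ _)

-- the body of A's for-loop: group = warnings of the run, values, yield ((first frame, last frame), values)
def projGroup (g : List (Int × (Int × String))) : (Int × Int) × List String :=
  let grp := g.map (·.2)
  let values := grp.map (·.2)
  (((grp.headD (0, "")).1, (grp.getLastD (0, "")).1), values)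

def compAmain (l : List (Int × (Int × String))) : List ((Int × Int) × List String) :=
  (groupByKey l).map projGroup

def compress_warnings_frames (warnings : List (Int × String)) : List ((Int × Int) × List String) :=
  compAmain (enumFrom 0 warnings)

-- ===== PORT B =====
-- one iteration of B's backward loop: acc holds the runs found so far, newest last, values reversed
def bStep (acc : List ((Int × Int) × List String)) (fv : Int × String) : List ((Int × Int) × List String) :=
  match acc.getLast? with
  | some ((s, e), vals) =>
    if s == fv.1 + 1 then acc.dropLast ++ [((fv.1, e), vals ++ [fv.2])]
    else acc ++ [((fv.1, fv.1), [fv.2])]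
  | none => acc ++ [((fv.1, fv.1), [fv.2])]

def compress_warnings_frames_alt (warnings : List (Int × String)) : List ((Int × Int) × List String) :=
  let acc := warnings.reverse.foldl bStep []
  acc.reverse.map (fun g => (g.1, g.2.reverse))

-- ===== PRECONDITION & SPEC =====
def Spec_compress_warnings_frames (warnings : List (Int × String)) (out : List ((Int × Int) × List String)) : Prop := out = compress_warnings_frames_alt warnings
instance (warnings : List (Int × String)) (out : List ((Int × Int) × List String)) : Decidable (Spec_compress_warnings_frames warnings out) := by unfold Spec_compress_warnings_frames; infer_instance

-- ===== CLAIM (what is proved, stated in full; the proofs are below) =====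
def Claim_equal_compress_warnings_frames : Prop := ∀ (warnings : List (Int × String)), Dom_compress_warnings_frames warnings → Spec_compress_warnings_frames warnings (compress_warnings_frames warnings)

-- ===== LEMMAS AND PROOFS =====

-- common recursive specification both ports are reduced to
def recB : List (Int × String) → List ((Int × Int) × List String)
  | [] => []
  | (f, v) :: ws =>
    match recB ws with
    | ((s, e), vals) :: tl =>
      if s = f + 1 then ((f, e), v :: vals) :: tl
      else ((f, f), [v]) :: ((s, e), vals) :: tl
    | [] => [((f, f), [v])]

-- postprocessing of B's accumulator
def postB (acc : List ((Int × Int) × List String)) : List ((Int × Int) × List String) :=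
  acc.reverse.map (fun g => (g.1, g.2.reverse))

lemma postB_concat (acc : List ((Int × Int) × List String)) (g : (Int × Int) × List String) :
    postB (acc ++ [g]) = (g.1, g.2.reverse) :: postB acc := by
  simp [postB]

-- B's fold equals recB after postprocessing
lemma foldr_bStep_eq (ws : List (Int × String)) :
    postB (ws.foldr (fun fv acc => bStep acc fv) []) = recB ws := by
  induction ws with
  | nil => rfl
  | cons hd tl ih =>
    obtain ⟨f, v⟩ := hd
    simp only [List.foldr_cons]
    set acc := tl.foldr (fun fv acc => bStep acc fv) [] with hacc
    rcases List.eq_nil_or_concat acc with h | ⟨init, last, h⟩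
    · rw [h] at ih ⊢
      simp [bStep, postB, recB, ← ih]
    · obtain ⟨⟨s, e⟩, vals⟩ := last
      rw [List.concat_eq_append] at h
      rw [h] at ih ⊢
      rw [postB_concat] at ih
      simp only [bStep, List.getLast?_concat, List.dropLast_concat]
      by_cases hs : s = f + 1
      · simp only [hs, beq_self_eq_true, if_true, postB_concat, recB, ← ih]
        simp
      · rw [if_neg (by simpa using hs), postB_concat, recB, ← ih, postB_concat]
        simp [hs]

lemma alt_eq_recB (ws : List (Int × String)) :
    compress_warnings_frames_alt ws = recB ws := by
  rw [compress_warnings_frames_alt, List.foldl_reverse, ← foldr_bStep_eq ws]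
  rfl

-- A's groupby pipeline equals recB, for any enumeration offset n
lemma compA_eq_recB (ws : List (Int × String)) : ∀ n : Int,
    compAmain (enumFrom n ws) = recB ws := by
  induction ws with
  | nil => intro n; simp [enumFrom, compAmain, groupByKey, recB]
  | cons hd rest ih =>
    intro n
    obtain ⟨f, v⟩ := hd
    match rest, ih with
    | [], _ =>
      simp [enumFrom, compAmain, groupByKey, projGroup, recB]
    | (g, v2) :: rest2, ih =>
      by_cases hg : g = f + 1
      · -- the run continues: the head of the next group merges in
        have hkey : ((n : Int) + 1 - g == n - f) = true := by rw [beq_iff_eq]; omega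
        have hn : (n : Int) - f = n + 1 - g := by omega
        have hA := ih (n + 1)
        simp only [enumFrom, compAmain, groupByKey, keyOf, List.takeWhile_cons,
          List.dropWhile_cons, hkey, if_true, List.map_cons, projGroup] at hA ⊢
        rw [hn, recB, ← hA]
        simp [hg, Function.comp_def]
      · -- the run breaks: a singleton group, then recurse
        have hkey : ((n : Int) + 1 - g == n - f) = false := by
          rw [beq_eq_false_iff_ne]; omega
        have hA := ih (n + 1)
        simp only [enumFrom, compAmain, groupByKey, keyOf, List.takeWhile_cons,
          List.dropWhile_cons, hkey, Bool.false_eq_true, if_false, List.map_cons] at hA ⊢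
        rw [show (projGroup [((n : Int), (f, v))]) = ((f, f), [v]) by rfl]
        rw [hA]
        -- recB ((g, v2) :: rest2) starts with frame g ≠ f + 1
        have hhead : ∃ e vals tl, recB ((g, v2) :: rest2) = ((g, e), vals) :: tl := by
          rcases h : recB rest2 with _ | ⟨⟨⟨s, e⟩, vals⟩, tl⟩
          · exact ⟨g, [v2], [], by simp [recB, h]⟩
          · by_cases hs : s = g + 1
            · exact ⟨e, v2 :: vals, tl, by simp [recB, h, hs]⟩
            · exact ⟨g, [v2], ((s, e), vals) :: tl, by simp [recB, h, hs]⟩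
        obtain ⟨e, vals, tl, hh⟩ := hhead
        rw [hh, recB, hh]
        simp [hg]

-- ===== VERDICT (by name: the statement is the Claim_ definition above) =====
theorem compress_warnings_frames_spec : Claim_equal_compress_warnings_frames := by
  intro warnings _
  unfold Spec_compress_warnings_frames
  rw [alt_eq_recB, compress_warnings_frames, compA_eq_recB]
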